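-- pv_equiv track=rewrite | github.com/alanxie1999/YdxbotV2 | zq_multiuser.py | count_lose_streaks
-- ===== SOURCE A (Python) =====
-- def count_lose_streaks(bet_sequence_log):
--     """统计连输次数 - 与master版本一致"""
--     lose_streaks = {}
--     current_streak = 0
--
--     for entry in bet_sequence_log:
--         profit = entry.get("profit", 0)
--         if profit < 0:
--             current_streak += 1
--         else:
--             if current_streak > 0:
--                 lose_streaks[current_streak] = lose_streaks.get(current_streak, 0) + 1
--             current_streak = 0
--
--     if current_streak > 0:
--         lose_streaks[current_streak] = lose_streaks.get(current_streak, 0) + 1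
--
--     return lose_streaks
-- ===== SOURCE B (Python) =====
-- def _lead(flags):
--     # length of the leading run of True values
--     k = 0
--     while k < len(flags) and flags[k]:
--         k += 1
--     return k
--
-- def count_lose_streaks(bet_sequence_log):
--     # Group-then-tally: map entries to loss flags, then consume each maximal
--     # run of losses wholesale and tally its length.
--     flags = [entry.get("profit", 0) < 0 for entry in bet_sequence_log]
--     result = {}
--     rest = flags
--     while rest:
--         if not rest[0]:
--             rest = rest[1:]
--             continue
--         m = _lead(rest[1:])
--         result[m + 1] = result.get(m + 1, 0) + 1
--         rest = rest[m + 1:]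
--     return result
-- ===== Notes on version B (the rewrite author's own statement) =====
-- stated objective: alternative
-- what changed: A keeps a running streak counter flushed on each non-loss and after the loop; B first maps entries to loss flags, then repeatedly consumes a whole maximal run of losses at once and tallies its length (group-then-tally), with no post-loop flush.
import Mathlib
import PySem

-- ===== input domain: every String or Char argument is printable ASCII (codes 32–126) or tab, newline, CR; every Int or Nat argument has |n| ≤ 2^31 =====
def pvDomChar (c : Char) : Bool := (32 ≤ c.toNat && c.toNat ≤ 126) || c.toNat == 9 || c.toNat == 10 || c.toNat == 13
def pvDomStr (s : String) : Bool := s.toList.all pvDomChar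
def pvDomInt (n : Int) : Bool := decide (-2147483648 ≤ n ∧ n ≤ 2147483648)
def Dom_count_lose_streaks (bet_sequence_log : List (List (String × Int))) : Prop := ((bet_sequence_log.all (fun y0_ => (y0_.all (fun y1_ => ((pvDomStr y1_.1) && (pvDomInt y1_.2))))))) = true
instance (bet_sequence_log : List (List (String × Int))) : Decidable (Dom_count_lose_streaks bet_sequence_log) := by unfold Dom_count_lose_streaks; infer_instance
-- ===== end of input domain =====

-- B replaces A's running streak counter + post-loop flush by a group-then-tally pass
-- (map to loss flags, consume each maximal run of losses wholesale); alternative, same result.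


-- ===== PORT A =====
def count_lose_streaks (bet_sequence_log : List (List (String × Int))) : List (Int × Int) :=
  let st := bet_sequence_log.foldl
    (fun (st : PySem.Dict Int Int × Int) entry =>
      let profit := (PySem.Dict.mk entry).getD "profit" 0
      if profit < 0 then (st.1, st.2 + 1)
      else if st.2 > 0 then (st.1.insert st.2 (st.1.getD st.2 0 + 1), 0)
      else (st.1, 0))
    (PySem.Dict.empty, 0)
  (if st.2 > 0 then st.1.insert st.2 (st.1.getD st.2 0 + 1) else st.1).items

-- ===== PORT B =====
-- _lead: length of the leading run of True flags (the while loop, as recursion)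
def pvLead : List Bool → Nat
  | [] => 0
  | false :: _ => 0
  | true :: fs => pvLead fs + 1

-- the main while loop of Source B: state = (rest, result); rest[m+1:] = fs.drop m
def pvRuns : List Bool → PySem.Dict Int Int → PySem.Dict Int Int
  | [], d => d
  | false :: fs, d => pvRuns fs d
  | true :: fs, d =>
      let m := pvLead fs
      pvRuns (fs.drop m) (d.insert ((m : Int) + 1) (d.getD ((m : Int) + 1) 0 + 1))
termination_by fs _ => fs.length
decreasing_by
  all_goals simp

def count_lose_streaks_alt (bet_sequence_log : List (List (String × Int))) : List (Int × Int) :=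
  let flags := bet_sequence_log.map (fun entry => decide ((PySem.Dict.mk entry).getD "profit" 0 < 0))
  (pvRuns flags PySem.Dict.empty).items

-- ===== PRECONDITION & SPEC =====
def Spec_count_lose_streaks (bet_sequence_log : List (List (String × Int))) (out : List (Int × Int)) : Prop := out = count_lose_streaks_alt bet_sequence_log
instance (bet_sequence_log : List (List (String × Int))) (out : List (Int × Int)) : Decidable (Spec_count_lose_streaks bet_sequence_log out) := by unfold Spec_count_lose_streaks; infer_instance

-- ===== CLAIM (what is proved, stated in full; the proofs are below) =====
def Claim_equal_count_lose_streaks : Prop := ∀ (bet_sequence_log : List (List (String × Int))), Dom_count_lose_streaks bet_sequence_log → Spec_count_lose_streaks bet_sequence_log (count_lose_streaks bet_sequence_log)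

-- ===== LEMMAS AND PROOFS =====
-- A's loop body, as a function of the loss flag only
def pvStepB (st : PySem.Dict Int Int × Int) (b : Bool) : PySem.Dict Int Int × Int :=
  if b then (st.1, st.2 + 1)
  else if st.2 > 0 then (st.1.insert st.2 (st.1.getD st.2 0 + 1), 0)
  else (st.1, 0)

-- A's post-loop flush
def pvFlush (st : PySem.Dict Int Int × Int) : PySem.Dict Int Int :=
  if st.2 > 0 then st.1.insert st.2 (st.1.getD st.2 0 + 1) else st.1

theorem pvLead_replicate_append (k : Nat) (l : List Bool) :
    pvLead (List.replicate k true ++ l) = k + pvLead l := by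
  induction k with
  | zero => simp
  | succ n ih => simp [List.replicate_succ, pvLead, ih]; omega

theorem pvMain (fs : List Bool) (d : PySem.Dict Int Int) (c : Nat) :
    pvFlush (fs.foldl pvStepB (d, (c : Int))) = pvRuns (List.replicate c true ++ fs) d := by
  induction fs generalizing d c with
  | nil =>
    cases c with
    | zero => simp [pvFlush, pvRuns]
    | succ k =>
      have h1 : pvLead (List.replicate k true) = k := by
        simpa using pvLead_replicate_append k []
      simp [pvFlush, List.replicate_succ, pvRuns, h1]
  | cons b fs ih =>
    cases b with
    | true =>
      have h : List.replicate c true ++ true :: fs = List.replicate (c + 1) true ++ fs := by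
        simp [List.replicate_succ']
      rw [List.foldl_cons, h]
      have hs : pvStepB (d, (c : Int)) true = (d, ((c + 1 : Nat) : Int)) := by
        simp [pvStepB]
      rw [hs, ih]
    | false =>
      cases c with
      | zero =>
        have hs : pvStepB (d, ((0 : Nat) : Int)) false = (d, ((0 : Nat) : Int)) := by
          simp [pvStepB]
        rw [List.foldl_cons, hs, ih]
        simp [pvRuns]
      | succ k =>
        have hlead : pvLead (List.replicate k true ++ false :: fs) = k := by
          simp [pvLead_replicate_append, pvLead]
        have hdrop : (List.replicate k true ++ false :: fs).drop k = false :: fs := by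
          simp
        have hs : pvStepB (d, ((k + 1 : Nat) : Int)) false
            = (d.insert ((k : Int) + 1) (d.getD ((k : Int) + 1) 0 + 1), ((0 : Nat) : Int)) := by
          simp [pvStepB]
        rw [List.foldl_cons, hs, ih]
        conv_rhs => rw [List.replicate_succ]
        simp only [List.cons_append, pvRuns, hlead, hdrop]
        simp

theorem count_lose_streaks_spec' (bet_sequence_log : List (List (String × Int))) :
    count_lose_streaks bet_sequence_log = count_lose_streaks_alt bet_sequence_log := by
  simp only [count_lose_streaks, count_lose_streaks_alt]
  have hfold : bet_sequence_log.foldl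
      (fun (st : PySem.Dict Int Int × Int) entry =>
        let profit := (PySem.Dict.mk entry).getD "profit" 0
        if profit < 0 then (st.1, st.2 + 1)
        else if st.2 > 0 then (st.1.insert st.2 (st.1.getD st.2 0 + 1), 0)
        else (st.1, 0))
      (PySem.Dict.empty, 0)
    = (bet_sequence_log.map
        (fun entry => decide ((PySem.Dict.mk entry).getD "profit" 0 < 0))).foldl
        pvStepB (PySem.Dict.empty, ((0 : Nat) : Int)) := by
    rw [List.foldl_map]
    congr 1
    funext st e
    simp [pvStepB]
  have hmain := pvMain (bet_sequence_log.map
      (fun entry => decide ((PySem.Dict.mk entry).getD "profit" 0 < 0)))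
      PySem.Dict.empty 0
  simp only [List.replicate_zero, List.nil_append] at hmain
  rw [hfold]
  exact congrArg PySem.Dict.items hmain

-- ===== VERDICT (by name: the statement is the Claim_ definition above) =====
theorem count_lose_streaks_spec : Claim_equal_count_lose_streaks := by
  intro log _
  unfold Spec_count_lose_streaks
  exact count_lose_streaks_spec' log
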